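-- pv_equiv track=rewrite | github.com/pypi-data/pypi-mirror-267 | packages/AstecManager/AstecManager-0.2.8-py3-none-any.whl/AstecManager/libs/graphs.py | split_range_in_bins
-- ===== SOURCE A (Python) =====
-- def split_range_in_bins(minb, maxb, bin_number):
--     """
--
--     :param minb:
--     :param maxb:
--     :param bin_number:
--
--     """
--     rangenumber = maxb - minb
--     part_duration = int(rangenumber / bin_number)
--     parts = []
--     marker = 0
--
--     for _ in range(bin_number):
--         part = [marker, marker + part_duration]
--         marker += part_duration
--         parts.append(part)
--     return parts
-- ===== SOURCE B (Python) =====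
-- def split_range_in_bins(minb, maxb, bin_number):
--     part_duration = int((maxb - minb) / bin_number)
--     edges = [i * part_duration for i in range(bin_number + 1)]
--     return [[a, b] for a, b in zip(edges, edges[1:])]
-- ===== Notes on version B (the rewrite author's own statement) =====
-- stated objective: alternative
-- what changed: Two-phase decomposition: precompute the bin-boundary table edges = [i*part_duration for i in range(bin_number+1)] and pair consecutive edges with zip, instead of accumulating a running marker inside one loop that emits intervals.
import Mathlib
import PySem

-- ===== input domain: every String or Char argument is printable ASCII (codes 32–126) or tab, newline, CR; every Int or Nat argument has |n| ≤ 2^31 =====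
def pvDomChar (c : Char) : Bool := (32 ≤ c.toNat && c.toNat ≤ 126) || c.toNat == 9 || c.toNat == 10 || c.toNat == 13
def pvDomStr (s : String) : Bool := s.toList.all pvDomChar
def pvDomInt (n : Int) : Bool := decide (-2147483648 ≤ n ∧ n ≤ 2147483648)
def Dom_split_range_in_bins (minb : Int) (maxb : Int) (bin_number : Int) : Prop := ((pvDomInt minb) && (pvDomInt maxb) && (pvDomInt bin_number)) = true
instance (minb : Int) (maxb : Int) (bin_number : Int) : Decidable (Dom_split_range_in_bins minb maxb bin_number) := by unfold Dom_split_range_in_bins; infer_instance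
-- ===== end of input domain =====

-- B replaces A's running-marker loop with a precomputed boundary table paired by zip (alternative decomposition, same cost).

-- ===== PORT A =====
-- int(rangenumber / bin_number): float division then truncation; exact as truncdiv on Dom (|args| ≤ 2^31 < 2^53)
def split_range_in_bins (minb : Int) (maxb : Int) (bin_number : Int) : List (List Int) :=
  let rangenumber := maxb - minb
  let part_duration := PySem.Int.truncdiv rangenumber bin_number
  let st := (PySem.List.pyRange 0 bin_number 1).foldl
    (fun (st : List (List Int) × Int) _ =>
      let part := [st.2, st.2 + part_duration]
      (st.1 ++ [part], st.2 + part_duration))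
    (([] : List (List Int)), (0 : Int))
  st.1

-- ===== PORT B =====
def split_range_in_bins_alt (minb : Int) (maxb : Int) (bin_number : Int) : List (List Int) :=
  let part_duration := PySem.Int.truncdiv (maxb - minb) bin_number
  let edges := (PySem.List.pyRange 0 (bin_number + 1) 1).map (fun i => i * part_duration)
  (edges.zip edges.tail).map (fun p => [p.1, p.2])

-- ===== PRECONDITION & SPEC =====
-- Pre_ excludes exactly bin_number = 0, where A raises ZeroDivisionError.
def Pre_split_range_in_bins (minb : Int) (maxb : Int) (bin_number : Int) : Prop := bin_number ≠ 0
instance (minb : Int) (maxb : Int) (bin_number : Int) : Decidable (Pre_split_range_in_bins minb maxb bin_number) := by unfold Pre_split_range_in_bins; infer_instance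
def pvWitness_split_range_in_bins : Int × Int × Int := (0, 10, 3)

def Spec_split_range_in_bins (minb : Int) (maxb : Int) (bin_number : Int) (out : List (List Int)) : Prop := out = split_range_in_bins_alt minb maxb bin_number
instance (minb : Int) (maxb : Int) (bin_number : Int) (out : List (List Int)) : Decidable (Spec_split_range_in_bins minb maxb bin_number out) := by unfold Spec_split_range_in_bins; infer_instance

-- ===== CLAIM (what is proved, stated in full; the proofs are below) =====
def Claim_equal_split_range_in_bins : Prop := ∀ (minb : Int) (maxb : Int) (bin_number : Int), Dom_split_range_in_bins minb maxb bin_number → Pre_split_range_in_bins minb maxb bin_number → Spec_split_range_in_bins minb maxb bin_number (split_range_in_bins minb maxb bin_number)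

-- ===== LEMMAS AND PROOFS =====

-- A's loop: folding over any n-element list appends, from marker m, the k-th interval [m+k*d, m+(k+1)*d]
theorem srib_foldA (d : Int) (l : List Int) (acc : List (List Int)) (m : Int) :
    (l.foldl (fun (st : List (List Int) × Int) _ =>
        (st.1 ++ [[st.2, st.2 + d]], st.2 + d)) (acc, m))
    = (acc ++ (List.range l.length).map (fun k : Nat => [m + (k : Int) * d, m + ((k : Int) + 1) * d]),
       m + l.length * d) := by
  induction l using List.reverseRecOn with
  | nil => simp
  | append_singleton xs x ih =>
    rw [List.foldl_append, ih, List.foldl_cons, List.foldl_nil]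
    simp only [List.length_append, List.length_cons, List.length_nil, Nat.add_zero,
      List.range_succ, List.map_append, List.map_cons, List.map_nil, ← List.append_assoc]
    refine Prod.ext ?_ ?_
    · dsimp only
      have h : m + (xs.length : Int) * d + d = m + ((xs.length : Int) + 1) * d := by ring
      rw [h]
    · dsimp only; push_cast; ring

-- B's pass: zipping the edge table with its tail pairs consecutive edges
theorem srib_zipB (f : Nat → Int) (t : Nat) :
    ((((List.range t).map f).zip ((List.range t).map f).tail).map (fun p => [p.1, p.2]))
    = (List.range (t - 1)).map (fun k => [f k, f (k + 1)]) := by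
  apply List.ext_getElem
  · simp
  · intro i h1 h2
    simp only [List.getElem_map, List.getElem_zip, List.getElem_tail, List.getElem_range]

-- ===== VERDICT (by name: the statement is the Claim_ definition above) =====
theorem split_range_in_bins_spec : Claim_equal_split_range_in_bins := by
  intro minb maxb bin_number _ hpre
  unfold Spec_split_range_in_bins
  simp only [split_range_in_bins, split_range_in_bins_alt, PySem.List.pyRange_one, List.map_map]
  rw [srib_foldA, srib_zipB]
  simp only [List.nil_append, List.length_map, List.length_range, Function.comp]
  have hlen : (bin_number - 0).toNat = (bin_number + 1 - 0).toNat - 1 := by omega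
  rw [hlen]
  refine List.map_congr_left fun k _ => ?_
  simp only [List.cons.injEq, and_true]
  exact ⟨by push_cast; ring, by push_cast; ring⟩
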